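-- pv_equiv track=rewrite | github.com/rchopinw/coding_exercise | quora.py | prime_number_multiplication
-- ===== SOURCE A (Python) =====
-- def prime_number_multiplication(nums):
--     results = []
--
--     def backtrack(idx, p):
--         if idx == len(nums):
--             return
--         for i in range(idx, len(nums)):
--             p *= nums[i]
--             results.append(p)
--             backtrack(i + 1, p)
--             p //= nums[i]
--
--     backtrack(0, 1)
--     return results
-- ===== SOURCE B (Python) =====
-- def prime_number_multiplication(nums):
--     n = len(nums)
--     results = []
--     stack = [(nums[i], i) for i in reversed(range(n))]
--     while stack:
--         p, i = stack.pop()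
--         results.append(p)
--         for j in reversed(range(i + 1, n)):
--             stack.append((p * nums[j], j))
--     return results
-- ===== Notes on version B (the rewrite author's own statement) =====
-- stated objective: alternative
-- what changed: Replaced the recursive backtracking with the p //= nums[i] restore step by an iterative loop over an explicit stack of (prefix_product, last_index) pairs, which never divides.
import Mathlib
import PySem

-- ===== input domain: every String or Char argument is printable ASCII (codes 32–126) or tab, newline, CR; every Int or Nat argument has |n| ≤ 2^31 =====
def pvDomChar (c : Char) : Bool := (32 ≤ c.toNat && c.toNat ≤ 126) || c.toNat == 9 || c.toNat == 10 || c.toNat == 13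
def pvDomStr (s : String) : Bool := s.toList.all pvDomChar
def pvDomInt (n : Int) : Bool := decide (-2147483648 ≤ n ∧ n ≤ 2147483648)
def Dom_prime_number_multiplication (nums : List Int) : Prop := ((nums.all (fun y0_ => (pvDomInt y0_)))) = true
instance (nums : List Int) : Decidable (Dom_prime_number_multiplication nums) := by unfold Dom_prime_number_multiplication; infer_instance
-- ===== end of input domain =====

-- B replaces A's recursive backtracking (with its p //= nums[i] restore division) by an
-- iterative explicit stack of (prefix_product, last_index) pairs; same DFS preorder output.

-- ===== PORT A =====
-- backtrack's body: 'if idx == len(nums): return' plus the for-loop from idx; the loop over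
-- i = idx..len-1 is this recursion on i, and the recursive call backtrack(i+1, p1) is the
-- same loop started at i+1 (its base case coincides with the empty loop).
def pvLoopA (nums : List Int) (i : Nat) (p : Int) (acc : List Int) : List Int :=
  if h : i < nums.length then
    let p1 := p * nums[i]                                 -- p *= nums[i]
    let acc1 := acc ++ [p1]                               -- results.append(p)
    let acc2 := pvLoopA nums (i + 1) p1 acc1              -- backtrack(i + 1, p)
    pvLoopA nums (i + 1) (PySem.Int.floordiv p1 nums[i]) acc2   -- p //= nums[i]; next i
  else acc
termination_by nums.length - i
decreasing_by all_goals omega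

def prime_number_multiplication (nums : List Int) : List Int :=
  pvLoopA nums 0 1 []

-- ===== PORT B =====
-- 'for j in reversed(range(i+1, n)): stack.append(...)': the stack top is the list head here,
-- so pushing j = n-1 .. i+1 in that order leaves the children in increasing j order on top.
def pvChildren (nums : List Int) (p : Int) (i : Nat) : List (Int × Nat) :=
  (List.range' (i + 1) (nums.length - (i + 1))).map (fun j => (p * nums.getD j 0, j))

-- termination measure of the stack loop (each entry weighs 2^(n - index))
def pvMeasure (nums : List Int) (stack : List (Int × Nat)) : Nat :=
  (stack.map (fun e => 2 ^ (nums.length - e.2))).sum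

lemma pvSumPow (n : Nat) : ∀ (k a : Nat), a + k ≤ n + 1 →
    (((List.range' a k).map (fun j => (2:Nat) ^ (n - j))).sum) < 2 ^ (n + 1 - a) := by
  intro k
  induction k with
  | zero => intro a _; simp
  | succ m ih =>
      intro a ha
      rw [List.range'_succ, List.map_cons, List.sum_cons]
      have h1 := ih (a + 1) (by omega)
      have e1 : n + 1 - (a + 1) = n - a := by omega
      rw [e1] at h1
      have e2 : n + 1 - a = (n - a) + 1 := by omega
      rw [e2, pow_succ]
      omega

lemma pvMeasure_children_lt (nums : List Int) (p : Int) (i : Nat) (rest : List (Int × Nat)) :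
    pvMeasure nums (pvChildren nums p i ++ rest) < pvMeasure nums ((p, i) :: rest) := by
  simp only [pvMeasure, pvChildren, List.map_append, List.map_map, List.sum_append,
    List.map_cons, List.sum_cons, Function.comp_def]
  have hpos : 1 ≤ 2 ^ (nums.length - i) := Nat.one_le_two_pow
  by_cases hi : i + 1 ≤ nums.length
  · have h := pvSumPow nums.length (nums.length - (i + 1)) (i + 1) (by omega)
    have e : nums.length + 1 - (i + 1) = nums.length - i := by omega
    rw [e] at h
    omega
  · have e0 : nums.length - (i + 1) = 0 := by omega
    rw [e0]
    simp

def pvLoopB (nums : List Int) (stack : List (Int × Nat)) (acc : List Int) : List Int :=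
  match stack with
  | [] => acc
  | (p, i) :: rest =>
      pvLoopB nums (pvChildren nums p i ++ rest) (acc ++ [p])   -- pop; append p; push children
termination_by pvMeasure nums stack
decreasing_by exact pvMeasure_children_lt nums p i rest

def prime_number_multiplication_alt (nums : List Int) : List Int :=
  pvLoopB nums ((List.range' 0 nums.length).map (fun i => (nums.getD i 0, i))) []

-- ===== PRECONDITION & SPEC =====
-- Pre_ excludes exactly the inputs on which A raises ZeroDivisionError (the restore step
-- p //= nums[i] with nums[i] = 0); A returns normally on every other list.
def Pre_prime_number_multiplication (nums : List Int) : Prop := (0 : Int) ∉ nums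
instance (nums : List Int) : Decidable (Pre_prime_number_multiplication nums) := by
  unfold Pre_prime_number_multiplication; infer_instance

def pvWitness_prime_number_multiplication : List Int := [2, 3, 5]

def Spec_prime_number_multiplication (nums : List Int) (out : List Int) : Prop :=
  out = prime_number_multiplication_alt nums
instance (nums : List Int) (out : List Int) : Decidable (Spec_prime_number_multiplication nums out) := by
  unfold Spec_prime_number_multiplication; infer_instance

-- ===== CLAIM (what is proved, stated in full; the proofs are below) =====
def Claim_equal_prime_number_multiplication : Prop :=
  ∀ (nums : List Int), Dom_prime_number_multiplication nums →
    Pre_prime_number_multiplication nums →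
    Spec_prime_number_multiplication nums (prime_number_multiplication nums)

-- ===== LEMMAS AND PROOFS =====

-- the accumulator of A's loop only prefixes the output
lemma pvLoopA_acc (nums : List Int) (k : Nat) :
    ∀ i p acc, nums.length ≤ i + k →
      pvLoopA nums i p acc = acc ++ pvLoopA nums i p [] := by
  induction k with
  | zero =>
      intro i p acc h
      rw [pvLoopA, pvLoopA, dif_neg (by omega), dif_neg (by omega)]
      simp
  | succ m ih =>
      intro i p acc h
      rw [pvLoopA, pvLoopA]
      by_cases hi : i < nums.length
      · rw [dif_pos hi, dif_pos hi]
        simp only []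
        rw [ih (i + 1) _ (acc ++ [p * nums[i]]) (by omega),
            ih (i + 1) _ ([] ++ [p * nums[i]]) (by omega),
            ih (i + 1) (PySem.Int.floordiv (p * nums[i]) nums[i]) _ (by omega),
            ih (i + 1) (PySem.Int.floordiv (p * nums[i]) nums[i])
              (([] ++ [p * nums[i]]) ++ pvLoopA nums (i + 1) (p * nums[i]) []) (by omega)]
        simp
      · rw [dif_neg hi, dif_neg hi]; simp

lemma pvFloordiv_mul_cancel (p x : Int) (hx : x ≠ 0) :
    PySem.Int.floordiv (p * x) x = p := by
  have hmod : PySem.Int.mod (p * x) x = 0 :=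
    (PySem.Int.mod_eq_zero_iff_dvd (p * x) x).2 ⟨p, by ring⟩
  have h := PySem.Int.floordiv_mul_add_mod (p * x) x
  rw [hmod, add_zero] at h
  exact mul_right_cancel₀ hx h

-- A's loop from i with prefix p, flattened over the remaining indices
lemma pvLoopA_flat (nums : List Int) (hz : ∀ x ∈ nums, x ≠ 0) (k : Nat) :
    ∀ i p, nums.length ≤ i + k →
      pvLoopA nums i p [] =
        (List.range' i (nums.length - i)).flatMap
          (fun j => (p * nums.getD j 0) :: pvLoopA nums (j + 1) (p * nums.getD j 0) []) := by
  induction k with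
  | zero =>
      intro i p h
      rw [pvLoopA, dif_neg (by omega)]
      have : nums.length - i = 0 := by omega
      simp [this]
  | succ m ih =>
      intro i p h
      by_cases hi : i < nums.length
      · rw [pvLoopA, dif_pos hi]
        simp only []
        have hx : nums[i] ≠ 0 := hz _ (List.getElem_mem hi)
        rw [pvFloordiv_mul_cancel p nums[i] hx]
        rw [pvLoopA_acc nums nums.length (i + 1) p _ (by omega)]
        have hr : nums.length - i = (nums.length - (i + 1)) + 1 := by omega
        rw [hr, List.range'_succ, List.flatMap_cons]
        have hg : nums.getD i 0 = nums[i] := by simp [List.getD, List.getElem?_eq_getElem hi]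
        rw [ih (i + 1) p (by omega), hg]
        rw [pvLoopA_acc nums nums.length (i + 1) (p * nums[i]) ([] ++ [p * nums[i]]) (by omega)]
        simp
      · rw [pvLoopA, dif_neg hi]
        have : nums.length - i = 0 := by omega
        simp [this]

-- B's stack loop, flattened: each stack entry (p, i) contributes p and then A's loop from i+1
lemma pvLoopB_flat (nums : List Int) (hz : ∀ x ∈ nums, x ≠ 0) :
    ∀ (N : Nat) (stack : List (Int × Nat)) (acc : List Int), pvMeasure nums stack ≤ N →
      pvLoopB nums stack acc =
        acc ++ stack.flatMap (fun e => e.1 :: pvLoopA nums (e.2 + 1) e.1 []) := by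
  intro N
  induction N with
  | zero =>
      intro stack acc h
      cases stack with
      | nil => simp [pvLoopB]
      | cons e rest =>
          exfalso
          have : 1 ≤ 2 ^ (nums.length - e.2) := Nat.one_le_two_pow
          simp [pvMeasure] at h
  | succ N ih =>
      intro stack acc h
      cases stack with
      | nil => simp [pvLoopB]
      | cons e rest =>
          obtain ⟨p, i⟩ := e
          rw [pvLoopB]
          have hlt := pvMeasure_children_lt nums p i rest
          rw [ih (pvChildren nums p i ++ rest) (acc ++ [p]) (by omega)]
          have hc : (pvChildren nums p i).flatMap
              (fun e => e.1 :: pvLoopA nums (e.2 + 1) e.1 []) =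
              pvLoopA nums (i + 1) p [] := by
            rw [pvChildren, List.flatMap_map,
                pvLoopA_flat nums hz nums.length (i + 1) p (by omega)]
          simp [hc]

-- ===== VERDICT (by name: the statement is the Claim_ definition above) =====
theorem prime_number_multiplication_spec : Claim_equal_prime_number_multiplication := by
  intro nums _ hpre
  have hz : ∀ x ∈ nums, x ≠ 0 := fun x hx h0 => hpre (h0 ▸ hx)
  show prime_number_multiplication nums = prime_number_multiplication_alt nums
  rw [prime_number_multiplication, prime_number_multiplication_alt,
      pvLoopB_flat nums hz (pvMeasure nums _) _ _ (le_refl _), List.flatMap_map,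
      pvLoopA_flat nums hz nums.length 0 1 (by omega)]
  simp
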